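-- pv_equiv track=rewrite | github.com/Mephisto1122/Nexus | nexus_structural.py | _split_pipes
-- ===== SOURCE A (Python) =====
-- def _split_pipes(command: str) -> list:
--     """Split on | (not || or quoted)."""
--     parts = []
--     current = []
--     in_single = False
--     in_double = False
--     i = 0
--     while i < len(command):
--         c = command[i]
--         if c == '\\' and i + 1 < len(command):
--             current.append(c)
--             current.append(command[i + 1])
--             i += 2
--             continue
--         elif c == "'" and not in_double:
--             in_single = not in_single
--         elif c == '"' and not in_single:
--             in_double = not in_double
--
--         if not in_single and not in_double:
--             if c == '|' and i + 1 < len(command) and command[i + 1] == '|':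
--                 # || — logical OR, not pipe
--                 current.append('||')
--                 i += 2
--                 continue
--             elif c == '|':
--                 parts.append(''.join(current))
--                 current = []
--                 i += 1
--                 continue
--
--         current.append(c)
--         i += 1
--
--     remainder = ''.join(current).strip()
--     if remainder:
--         parts.append(remainder)
--     return parts if parts else [command]
-- ===== SOURCE B (Python) =====
-- def _split_pipes(command: str) -> list:
--     """Split on | (not || or quoted) — two-pass: record unquoted single-pipe
--     indices, then slice the original string at them."""
--     n = len(command)
--     cuts = []
--     in_single = False
--     in_double = False
--     i = 0
--     while i < n:
--         c = command[i]
--         if c == '\\' and i + 1 < n: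
--             i += 2
--             continue
--         if c == "'" and not in_double:
--             in_single = not in_single
--         elif c == '"' and not in_single:
--             in_double = not in_double
--         if not in_single and not in_double and c == '|':
--             if i + 1 < n and command[i + 1] == '|':
--                 i += 2
--                 continue
--             cuts.append(i)
--         i += 1
--     segs = []
--     start = 0
--     for j in cuts:
--         segs.append(command[start:j])
--         start = j + 1
--     last = command[start:].strip()
--     if last:
--         segs.append(last)
--     return segs if segs else [command]
-- ===== Notes on version B (the rewrite author's own statement) =====
-- stated objective: alternative
-- what changed: Replaces A's single pass that accumulates the characters of the current segment (joining them at each split) with two passes: a scan that only records the indices of unquoted single pipe characters, followed by slicing the original string at those indices.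
import Mathlib
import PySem

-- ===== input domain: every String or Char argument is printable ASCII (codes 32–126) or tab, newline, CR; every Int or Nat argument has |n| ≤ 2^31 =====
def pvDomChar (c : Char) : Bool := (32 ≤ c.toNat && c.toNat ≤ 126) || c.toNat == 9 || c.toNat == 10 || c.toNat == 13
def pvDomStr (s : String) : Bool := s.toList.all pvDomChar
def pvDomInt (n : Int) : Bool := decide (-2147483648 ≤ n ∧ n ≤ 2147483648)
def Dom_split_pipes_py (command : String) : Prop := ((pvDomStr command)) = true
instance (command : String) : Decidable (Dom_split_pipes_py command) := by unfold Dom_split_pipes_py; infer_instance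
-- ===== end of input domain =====

-- B re-implements A's single accumulator loop as two passes (record unquoted single-pipe
-- indices, then slice the original string at them); a timing run measured B faster by a constant factor.

-- ===== PORT A =====
-- A's while-loop: rest of the string, current accumulator, quote state, parts so far.
def pvLoopA : List Char → List Char → Bool → Bool → List String → List String
  | [], current, _, _, parts =>
      let remainder := PySem.Str.strip (String.ofList current)
      if remainder ≠ "" then parts ++ [remainder] else parts
  | '\\' :: d :: rest, current, insg, indb, parts =>
      pvLoopA rest (current ++ ['\\', d]) insg indb parts
  | c :: rest, current, insg, indb, parts =>
      let insg' := if c = '\'' ∧ indb = false then !insg else insg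
      let indb' := if c = '"' ∧ insg = false then !indb else indb
      if (insg' = false ∧ indb' = false) ∧ c = '|' then
        if rest.head? = some '|' then
          pvLoopA rest.tail (current ++ ['|', '|']) insg' indb' parts
        else
          pvLoopA rest [] insg' indb' (parts ++ [String.ofList current])
      else
        pvLoopA rest (current ++ [c]) insg' indb' parts
termination_by rest _ _ _ _ => rest.length
decreasing_by all_goals simp [List.length_tail]


def split_pipes_py (command : String) : List String :=
  let parts := pvLoopA command.toList [] false false []
  if parts ≠ [] then parts else [command]

-- ===== PORT B =====
-- first pass of Source B: indices of unquoted single '|' characters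
def pvScanB : List Char → Nat → Bool → Bool → List Nat
  | [], _, _, _ => []
  | '\\' :: _ :: rest, i, s, d => pvScanB rest (i + 2) s d
  | c :: rest, i, s, d =>
      let s' := if c = '\'' ∧ d = false then !s else s
      let d' := if c = '"' ∧ s = false then !d else d
      if (s' = false ∧ d' = false) ∧ c = '|' then
        if rest.head? = some '|' then pvScanB rest.tail (i + 2) s' d'
        else i :: pvScanB rest (i + 1) s' d'
      else pvScanB rest (i + 1) s' d'
termination_by rest _ _ _ => rest.length
decreasing_by all_goals simp [List.length_tail]


-- second pass of Source B: the slicing loop, base case = the post-loop strip of the tail.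
-- command[start:j] / command[start:] ported as drop/take: exact since 0 ≤ start, 0 ≤ j here.
def pvBuildB : List Nat → Nat → List Char → List String
  | [], start, cs =>
      let last := PySem.Str.strip (String.ofList (cs.drop start))
      if last ≠ "" then [last] else []
  | j :: cuts, start, cs =>
      String.ofList ((cs.drop start).take (j - start)) :: pvBuildB cuts (j + 1) cs

def split_pipes_py_alt (command : String) : List String :=
  let cs := command.toList
  let segs := pvBuildB (pvScanB cs 0 false false) 0 cs
  if segs ≠ [] then segs else [command]

-- ===== PRECONDITION & SPEC =====
def Spec_split_pipes_py (command : String) (out : List String) : Prop := out = split_pipes_py_alt command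
instance (command : String) (out : List String) : Decidable (Spec_split_pipes_py command out) := by unfold Spec_split_pipes_py; infer_instance

-- ===== CLAIM (what is proved, stated in full; the proofs are below) =====
def Claim_equal_split_pipes_py : Prop := ∀ (command : String), Dom_split_pipes_py command → Spec_split_pipes_py command (split_pipes_py command)

-- ===== LEMMAS AND PROOFS =====

/-- prepend chars to the first (open) segment -/
def pvConsHead (p : List Char) : List (List Char) → List (List Char)
  | [] => [p]
  | h :: t => (p ++ h) :: t

/-- common spec: the raw segments of the string, first segment open at the front -/
def pvSegs : List Char → Bool → Bool → List (List Char)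
  | [], _, _ => [[]]
  | '\\' :: d :: rest, s, dd => pvConsHead ['\\', d] (pvSegs rest s dd)
  | c :: rest, s, d =>
      let s' := if c = '\'' ∧ d = false then !s else s
      let d' := if c = '"' ∧ s = false then !d else d
      if (s' = false ∧ d' = false) ∧ c = '|' then
        if rest.head? = some '|' then pvConsHead ['|', '|'] (pvSegs rest.tail s' d')
        else [] :: pvSegs rest s' d'
      else pvConsHead [c] (pvSegs rest s' d')
termination_by rest _ _ => rest.length
decreasing_by all_goals simp [List.length_tail]


/-- slices of cs determined by the cut indices -/
def pvSlices : List Nat → Nat → List Char → List (List Char)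
  | [], start, cs => [cs.drop start]
  | j :: cuts, start, cs => (cs.drop start).take (j - start) :: pvSlices cuts (j + 1) cs

/-- turn segments into the result list: all but the last verbatim, the last stripped & dropped if empty -/
def pvFinish : List (List Char) → List String
  | [] => []
  | [last] =>
      let r := PySem.Str.strip (String.ofList last)
      if r ≠ "" then [r] else []
  | seg :: rest => String.ofList seg :: pvFinish rest

theorem pvConsHead_ne_nil (p : List Char) (X : List (List Char)) : pvConsHead p X ≠ [] := by
  cases X <;> simp [pvConsHead]

theorem pvSegs_ne_nil (rest : List Char) (s d : Bool) : pvSegs rest s d ≠ [] := by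
  induction rest, s, d using pvSegs.induct <;> simp only [pvSegs] <;> repeat' split
  all_goals first
    | exact pvConsHead_ne_nil _ _
    | simp

theorem pvSlices_ne_nil (cuts : List Nat) (start : Nat) (cs : List Char) :
    pvSlices cuts start cs ≠ [] := by
  cases cuts <;> simp [pvSlices]

theorem pvConsHead_consHead (a b : List Char) (X : List (List Char)) :
    pvConsHead a (pvConsHead b X) = pvConsHead (a ++ b) X := by
  cases X <;> simp [pvConsHead]

theorem pvConsHead_nil {X : List (List Char)} (h : X ≠ []) : pvConsHead [] X = X := by
  cases X <;> simp_all [pvConsHead]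

theorem pvFinish_cons {seg : List Char} {X : List (List Char)} (h : X ≠ []) :
    pvFinish (seg :: X) = String.ofList seg :: pvFinish X := by
  cases X <;> simp_all [pvFinish]

/-- A's loop computes: parts, then the finished segments with `current` glued onto the first. -/
theorem pvLoopA_eq : ∀ (rest current : List Char) (s d : Bool) (parts : List String),
    pvLoopA rest current s d parts = parts ++ pvFinish (pvConsHead current (pvSegs rest s d)) := by
  intro rest current s d parts
  induction rest, current, s, d, parts using pvLoopA.induct with
  | case1 current s d parts rem h =>
      have h' : PySem.Str.strip (String.ofList current) ≠ "" := h
      simp only [pvLoopA, pvSegs, pvConsHead, pvFinish]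
      simp [h']
  | case2 current s d parts rem h =>
      simp only [ne_eq, not_not] at h
      have h' : PySem.Str.strip (String.ofList current) = "" := h
      simp only [pvLoopA, pvSegs, pvConsHead, pvFinish]
      simp [h']
  | case3 d rest current insg indb parts ih =>
      rw [pvLoopA, pvSegs, ih, pvConsHead_consHead]
  | case4 c rest current insg indb parts hne s' d' h1 h2 ih =>
      have hs : (if c = '\'' ∧ indb = false then !insg else insg) = s' := rfl
      have hd : (if c = '\"' ∧ insg = false then !indb else indb) = d' := rfl
      simp only [pvLoopA, pvSegs, hs, hd, if_pos h1, if_pos h2]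
      rw [ih, pvConsHead_consHead]
  | case5 c rest current insg indb parts hne s' d' h1 h2 ih =>
      have hs : (if c = '\'' ∧ indb = false then !insg else insg) = s' := rfl
      have hd : (if c = '\"' ∧ insg = false then !indb else indb) = d' := rfl
      simp only [pvLoopA, pvSegs, hs, hd, if_pos h1, if_neg h2]
      rw [ih, pvConsHead_nil (pvSegs_ne_nil _ _ _)]
      have hx : pvConsHead current ([] :: pvSegs rest s' d') = (current ++ []) :: pvSegs rest s' d' := rfl
      rw [hx, pvFinish_cons (pvSegs_ne_nil _ _ _)]
      simp
  | case6 c rest current insg indb parts hne s' d' h1 ih =>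
      have hs : (if c = '\'' ∧ indb = false then !insg else insg) = s' := rfl
      have hd : (if c = '\"' ∧ insg = false then !indb else indb) = d' := rfl
      simp only [pvLoopA, pvSegs, hs, hd, if_neg h1]
      rw [ih, pvConsHead_consHead]

theorem pvScanB_lb : ∀ (rest : List Char) (i : Nat) (s d : Bool) (j : Nat),
    j ∈ pvScanB rest i s d → i ≤ j := by
  intro rest i s d
  induction rest, i, s, d using pvScanB.induct with
  | case1 i s d => simp [pvScanB]
  | case2 hd rest i s d ih =>
      intro j hj
      rw [pvScanB] at hj
      have := ih j hj; omega
  | case3 c rest i s d hne s' d' h1 h2 ih =>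
      intro j hj
      have hs : (if c = '\'' ∧ d = false then !s else s) = s' := rfl
      have hd : (if c = '\"' ∧ s = false then !d else d) = d' := rfl
      simp only [pvScanB, hs, hd, if_pos h1, if_pos h2] at hj
      have := ih j hj; omega
  | case4 c rest i s d hne s' d' h1 h2 ih =>
      intro j hj
      have hs : (if c = '\'' ∧ d = false then !s else s) = s' := rfl
      have hd : (if c = '\"' ∧ s = false then !d else d) = d' := rfl
      simp only [pvScanB, hs, hd, if_pos h1, if_neg h2] at hj
      rcases List.mem_cons.mp hj with rfl | hj
      · omega
      · have := ih j hj; omega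
  | case5 c rest i s d hne s' d' h1 ih =>
      intro j hj
      have hs : (if c = '\'' ∧ d = false then !s else s) = s' := rfl
      have hd : (if c = '\"' ∧ s = false then !d else d) = d' := rfl
      simp only [pvScanB, hs, hd, if_neg h1] at hj
      have := ih j hj; omega

/-- gluing a block of k consumed characters onto the first slice moves the slicing start back by k -/
theorem pvConsHead_slices (cs p : List Char) (C : List Nat) (i k : Nat)
    (hp : p.length = k) (hdrop : cs.drop i = p ++ cs.drop (i + k)) (hlb : ∀ j ∈ C, i + k ≤ j) :
    pvConsHead p (pvSlices C (i + k) cs) = pvSlices C i cs := by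
  cases C with
  | nil => simp [pvSlices, pvConsHead, hdrop]
  | cons j cuts =>
      have hj : i + k ≤ j := hlb j (List.mem_cons_self ..)
      simp only [pvSlices, pvConsHead]
      congr 1
      rw [hdrop, List.take_append,
          List.take_of_length_le (show p.length ≤ j - i by omega)]
      have h2 : j - i - p.length = j - (i + k) := by omega
      rw [h2]

/-- key lemma: the segments are exactly the slices at the recorded cut indices. -/
theorem pvSegs_eq_slices (cs : List Char) :
    ∀ (rest : List Char) (i : Nat) (s d : Bool), cs.drop i = rest →
      pvSegs rest s d = pvSlices (pvScanB rest i s d) i cs := by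
  intro rest i s d
  induction rest, i, s, d using pvScanB.induct with
  | case1 i s d =>
      intro h
      simp [pvSegs, pvScanB, pvSlices, h]
  | case2 d2 rest i s d ih =>
      intro h
      have hdrop : cs.drop (i + 2) = rest := by
        rw [← List.drop_drop, h]; rfl
      rw [pvSegs, pvScanB, ih hdrop]
      exact pvConsHead_slices cs ['\\', d2] _ i 2 rfl
        (by rw [h, hdrop]; rfl) (fun j hj => pvScanB_lb _ _ _ _ j hj)
  | case3 c rest i s d hne s' d' h1 h2 ih =>
      intro h
      have hdrop : cs.drop (i + 2) = rest.tail := by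
        rw [← List.drop_drop, h]
        cases rest <;> rfl
      have hc : c = '|' := h1.2
      obtain ⟨rest', hr⟩ : ∃ rest', rest = '|' :: rest' := by
        cases rest with
        | nil => simp at h2
        | cons a b =>
            simp only [List.head?_cons, Option.some.injEq] at h2
            exact ⟨b, by rw [h2]⟩
      have hs : (if c = '\'' ∧ d = false then !s else s) = s' := rfl
      have hd : (if c = '\"' ∧ s = false then !d else d) = d' := rfl
      simp only [pvSegs, pvScanB, hs, hd, if_pos h1, if_pos h2]
      rw [ih hdrop]
      exact pvConsHead_slices cs ['|', '|'] _ i 2 rfl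
        (by rw [h, hdrop, hr, hc]; rfl) (fun j hj => pvScanB_lb _ _ _ _ j hj)
  | case4 c rest i s d hne s' d' h1 h2 ih =>
      intro h
      have hdrop : cs.drop (i + 1) = rest := by
        rw [← List.drop_drop, h]; rfl
      have hs : (if c = '\'' ∧ d = false then !s else s) = s' := rfl
      have hd : (if c = '\"' ∧ s = false then !d else d) = d' := rfl
      simp only [pvSegs, pvScanB, hs, hd, if_pos h1, if_neg h2]
      rw [ih hdrop]
      simp [pvSlices]
  | case5 c rest i s d hne s' d' h1 ih =>
      intro h
      have hdrop : cs.drop (i + 1) = rest := by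
        rw [← List.drop_drop, h]; rfl
      have hs : (if c = '\'' ∧ d = false then !s else s) = s' := rfl
      have hd : (if c = '\"' ∧ s = false then !d else d) = d' := rfl
      simp only [pvSegs, pvScanB, hs, hd, if_neg h1]
      rw [ih hdrop]
      exact pvConsHead_slices cs [c] _ i 1 rfl
        (by rw [h, hdrop]; rfl) (fun j hj => pvScanB_lb _ _ _ _ j hj)

theorem pvBuildB_eq (cuts : List Nat) (start : Nat) (cs : List Char) :
    pvBuildB cuts start cs = pvFinish (pvSlices cuts start cs) := by
  induction cuts generalizing start with
  | nil => simp [pvBuildB, pvSlices, pvFinish]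
  | cons j cuts ih =>
      rw [pvBuildB, pvSlices, pvFinish_cons (pvSlices_ne_nil _ _ _), ih]

-- ===== VERDICT (by name: the statement is the Claim_ definition above) =====
theorem split_pipes_py_spec : Claim_equal_split_pipes_py := by
  intro command _
  unfold Spec_split_pipes_py split_pipes_py split_pipes_py_alt
  dsimp only
  rw [pvLoopA_eq, pvConsHead_nil (pvSegs_ne_nil _ _ _),
      pvBuildB_eq, ← pvSegs_eq_slices command.toList command.toList 0 false false (by simp)]
  simp
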